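-- pv_equiv track=rewrite | github.com/Gjiha/MyLeetcode | Medium/Solved/1813_Sentence_Similarity_III.py | areSentencesSimilar
-- ===== SOURCE A (Python) =====
-- def areSentencesSimilar(sentence1: str, sentence2: str) -> bool:
--     sentence1 = sentence1.split()
--     sentence2 = sentence2.split()
--
--     if len(sentence1) > len(sentence2):
--         listToObtain = sentence1
--         listToComplete = sentence2
--     else:
--         listToComplete = sentence1
--         listToObtain = sentence2
--
--     i = 0
--     j = 1
--     startingList = []
--     endingList = []
--
--     while i <= len(listToComplete) - j:
--         if listToComplete[i] == listToObtain[i]: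
--             startingList.append(listToComplete[i])
--             i += 1
--
--         elif listToComplete[len(listToComplete) - j] == listToObtain[len(listToObtain) - j]:
--             endingList.append(listToComplete[len(listToComplete) - j])
--             j += 1
--
--         else:
--             break
--
--     endingList.reverse()
--
--     controlList = startingList[:] + endingList[:]
--
--     if controlList != listToComplete:
--         return False
--
--     while i <= len(listToObtain) - j:
--         startingList.append(listToObtain[i])
--         i += 1
--
--     startingList.extend(endingList)
--
--     return True if listToObtain == startingList else False
-- ===== SOURCE B (Python) =====
-- def areSentencesSimilar(sentence1: str, sentence2: str) -> bool:
--     w1 = sentence1.split()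
--     w2 = sentence2.split()
--     if len(w1) > len(w2):
--         short, long = w2, w1
--     else:
--         short, long = w1, w2
--     n, m = len(short), len(long)
--     p = 0
--     while p < n and short[p] == long[p]:
--         p += 1
--     s = 0
--     while s < n - p and short[n - 1 - s] == long[m - 1 - s]:
--         s += 1
--     return p + s == n
-- ===== Notes on version B (the rewrite author's own statement) =====
-- stated objective: simpler
-- what changed: A interleaves a two-pointer loop that builds, reverses and concatenates prefix/suffix word lists, compares the reconstruction against the short sentence and then re-fills the middle from the long one; B just counts the common-prefix length and the capped common-suffix length and checks that they add up to the short length, with no intermediate lists or reconstruction.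
import Mathlib
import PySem

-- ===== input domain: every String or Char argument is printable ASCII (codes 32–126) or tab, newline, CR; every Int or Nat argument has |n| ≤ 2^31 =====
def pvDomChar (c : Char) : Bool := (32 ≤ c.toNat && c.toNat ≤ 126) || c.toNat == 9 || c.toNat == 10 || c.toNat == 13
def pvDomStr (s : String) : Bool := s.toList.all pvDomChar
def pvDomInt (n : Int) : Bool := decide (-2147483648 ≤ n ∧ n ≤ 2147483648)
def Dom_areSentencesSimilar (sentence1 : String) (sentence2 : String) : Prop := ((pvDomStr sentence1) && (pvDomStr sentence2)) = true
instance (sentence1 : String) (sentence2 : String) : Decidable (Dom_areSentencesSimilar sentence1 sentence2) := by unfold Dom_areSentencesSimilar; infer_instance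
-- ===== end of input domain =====

-- B replaces A's list-building/reversing/reconstructing two-pointer loop by two plain
-- counters (common prefix length, capped common suffix length) compared to the short length.

-- ===== PORT A =====
-- xs[i]; every index either program uses is in range, so the default "" is never returned.
def pvGetS (xs : List String) (i : Int) : String := (PySem.List.pyGet? xs i).getD ""

-- A's first while loop; state (i, j, startingList, endingList); returns the state at exit/break.
def aLoop (sh lo : List String) (i j : Int) (st en : List String) :
    Int × Int × List String × List String :=
  if _h : i ≤ (sh.length : Int) - j then
    if pvGetS sh i = pvGetS lo i then
      aLoop sh lo (i + 1) j (st ++ [pvGetS sh i]) en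
    else if pvGetS sh ((sh.length : Int) - j) = pvGetS lo ((lo.length : Int) - j) then
      aLoop sh lo i (j + 1) st (en ++ [pvGetS sh ((sh.length : Int) - j)])
    else (i, j, st, en)
  else (i, j, st, en)
termination_by ((sh.length : Int) - j - i + 1).toNat
decreasing_by all_goals omega

-- A's second while loop: appends listToObtain[i] while i <= len(listToObtain) - j.
def aFill (lo : List String) (j i : Int) (st : List String) : List String :=
  if _h : i ≤ (lo.length : Int) - j then aFill lo j (i + 1) (st ++ [pvGetS lo i]) else st
termination_by ((lo.length : Int) - j - i + 1).toNat
decreasing_by omega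

-- the straight-line tail of A after the first loop (reverse, control check, fill, final compare)
def aFinish (sh lo : List String) (r : Int × Int × List String × List String) : Bool :=
  let en := r.2.2.2.reverse
  let control := r.2.2.1 ++ en
  if control ≠ sh then false
  else if lo = aFill lo r.2.1 r.1 r.2.2.1 ++ en then true else false

def areSentencesSimilar (sentence1 : String) (sentence2 : String) : Bool :=
  let l1 := PySem.Str.split₀ sentence1
  let l2 := PySem.Str.split₀ sentence2
  let listToObtain := if l1.length > l2.length then l1 else l2
  let listToComplete := if l1.length > l2.length then l2 else l1
  aFinish listToComplete listToObtain (aLoop listToComplete listToObtain 0 1 [] [])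

-- ===== PORT B =====
-- while p < n and short[p] == long[p]: p += 1
def bPfx (sh lo : List String) (p : Int) : Int :=
  if h : p < (sh.length : Int) then
    if pvGetS sh p = pvGetS lo p then bPfx sh lo (p + 1) else p
  else p
termination_by ((sh.length : Int) - p).toNat
decreasing_by omega

-- while s < n - p and short[n-1-s] == long[m-1-s]: s += 1
def bSfx (sh lo : List String) (p s : Int) : Int :=
  if h : s < (sh.length : Int) - p then
    if pvGetS sh ((sh.length : Int) - 1 - s) = pvGetS lo ((lo.length : Int) - 1 - s) then
      bSfx sh lo p (s + 1)
    else s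
  else s
termination_by ((sh.length : Int) - p - s).toNat
decreasing_by omega

def areSentencesSimilar_alt (sentence1 : String) (sentence2 : String) : Bool :=
  let w1 := PySem.Str.split₀ sentence1
  let w2 := PySem.Str.split₀ sentence2
  let sh := if w1.length > w2.length then w2 else w1
  let lo := if w1.length > w2.length then w1 else w2
  let p := bPfx sh lo 0
  let s := bSfx sh lo p 0
  decide (p + s = (sh.length : Int))

-- ===== PRECONDITION & SPEC =====
def Spec_areSentencesSimilar (sentence1 : String) (sentence2 : String) (out : Bool) : Prop := out = areSentencesSimilar_alt sentence1 sentence2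
instance (sentence1 : String) (sentence2 : String) (out : Bool) : Decidable (Spec_areSentencesSimilar sentence1 sentence2 out) := by unfold Spec_areSentencesSimilar; infer_instance

-- ===== CLAIM (what is proved, stated in full; the proofs are below) =====
def Claim_equal_areSentencesSimilar : Prop := ∀ (sentence1 : String) (sentence2 : String), Dom_areSentencesSimilar sentence1 sentence2 → Spec_areSentencesSimilar sentence1 sentence2 (areSentencesSimilar sentence1 sentence2)

-- ===== LEMMAS AND PROOFS =====

theorem pvGetS_eq (xs : List String) (i : Int) (h0 : 0 ≤ i) (h : i.toNat < xs.length) :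
    pvGetS xs i = xs[i.toNat] := by
  simp [pvGetS, PySem.List.pyGet?_of_nonneg xs h0, List.getElem?_eq_getElem h]

theorem pvGetS_nonneg (xs : List String) (i : Int) (h0 : 0 ≤ i) :
    pvGetS xs i = (xs[i.toNat]?).getD "" := by
  simp [pvGetS, PySem.List.pyGet?_of_nonneg xs h0]

theorem drop_eq_get (sh lo : List String) (a b t : Nat) (h : sh.drop a = lo.drop b) :
    sh[a + t]? = lo[b + t]? := by
  have := congrArg (fun l => l[t]?) h
  simpa [List.getElem?_drop] using this

theorem match_of_take_eq (sh lo : List String) (i : Int)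
    (h : sh.take i.toNat = lo.take i.toNat) (k : Int) (h0 : 0 ≤ k) (hk : k < i) :
    pvGetS sh k = pvGetS lo k := by
  have h1 : sh[k.toNat]? = lo[k.toNat]? := by
    have h2 := congrArg (fun l => l[k.toNat]?) h
    simpa [List.getElem?_take, show k.toNat < i.toNat by omega] using h2
  rw [pvGetS_nonneg sh k h0, pvGetS_nonneg lo k h0, h1]

theorem bPfx_bounds (sh lo : List String) :
    ∀ (fuel : Nat) (q : Int), fuel = ((sh.length : Int) - q).toNat → 0 ≤ q →
      q ≤ (sh.length : Int) → q ≤ bPfx sh lo q ∧ bPfx sh lo q ≤ (sh.length : Int) := by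
  intro fuel
  induction fuel using Nat.strong_induction_on with
  | _ fuel IH =>
  intro q hf h0 hq
  rw [bPfx]
  split_ifs with h1 h2
  · have := IH ((sh.length : Int) - (q + 1)).toNat (by omega) (q + 1) rfl (by omega) (by omega)
    omega
  · omega
  · omega

theorem bPfx_match (sh lo : List String) :
    ∀ (fuel : Nat) (q k : Int), fuel = ((sh.length : Int) - q).toNat → 0 ≤ q → q ≤ k →
      k < bPfx sh lo q → pvGetS sh k = pvGetS lo k := by
  intro fuel
  induction fuel using Nat.strong_induction_on with
  | _ fuel IH =>
  intro q k hf h0 hqk hk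
  rw [bPfx] at hk
  split_ifs at hk with h1 h2
  · by_cases hkq : k = q
    · exact hkq ▸ h2
    · exact IH ((sh.length : Int) - (q + 1)).toNat (by omega) (q + 1) k rfl (by omega)
        (by omega) hk
  · omega
  · omega

theorem bPfx_ge (sh lo : List String) :
    ∀ (fuel : Nat) (q t : Int), fuel = (t - q).toNat → 0 ≤ q → q ≤ t →
      t ≤ (sh.length : Int) →
      (∀ k : Int, q ≤ k → k < t → pvGetS sh k = pvGetS lo k) → t ≤ bPfx sh lo q := by
  intro fuel
  induction fuel using Nat.strong_induction_on with
  | _ fuel IH =>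
  intro q t hf h0 hqt ht hm
  by_cases hq : t ≤ q
  · have := bPfx_bounds sh lo ((sh.length : Int) - q).toNat q rfl h0 (by omega)
    omega
  · rw [bPfx, dif_pos (by omega : q < (sh.length : Int)),
      if_pos (hm q le_rfl (by omega))]
    exact IH (t - (q + 1)).toNat (by omega) (q + 1) t rfl (by omega) (by omega) ht
      (fun k hk1 hk2 => hm k (by omega) hk2)

theorem bSfx_bounds (sh lo : List String) (p : Int) :
    ∀ (fuel : Nat) (s : Int), fuel = ((sh.length : Int) - p - s).toNat →
      s ≤ (sh.length : Int) - p →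
      s ≤ bSfx sh lo p s ∧ bSfx sh lo p s ≤ (sh.length : Int) - p := by
  intro fuel
  induction fuel using Nat.strong_induction_on with
  | _ fuel IH =>
  intro s hf hs
  rw [bSfx]
  split_ifs with h1 h2
  · have := IH ((sh.length : Int) - p - (s + 1)).toNat (by omega) (s + 1) rfl (by omega)
    omega
  · omega
  · omega

theorem bSfx_match (sh lo : List String) (p : Int) :
    ∀ (fuel : Nat) (s k : Int), fuel = ((sh.length : Int) - p - s).toNat → s ≤ k →
      k < bSfx sh lo p s →
      pvGetS sh ((sh.length : Int) - 1 - k) = pvGetS lo ((lo.length : Int) - 1 - k) := by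
  intro fuel
  induction fuel using Nat.strong_induction_on with
  | _ fuel IH =>
  intro s k hf hsk hk
  rw [bSfx] at hk
  split_ifs at hk with h1 h2
  · by_cases hks : k = s
    · exact hks ▸ h2
    · exact IH ((sh.length : Int) - p - (s + 1)).toNat (by omega) (s + 1) k rfl (by omega) hk
  · omega
  · omega

theorem bSfx_ge (sh lo : List String) (p : Int) :
    ∀ (fuel : Nat) (s t : Int), fuel = (t - s).toNat → s ≤ t →
      t ≤ (sh.length : Int) - p →
      (∀ k : Int, s ≤ k → k < t →
        pvGetS sh ((sh.length : Int) - 1 - k) = pvGetS lo ((lo.length : Int) - 1 - k)) →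
      t ≤ bSfx sh lo p s := by
  intro fuel
  induction fuel using Nat.strong_induction_on with
  | _ fuel IH =>
  intro s t hf hst ht hm
  by_cases hq : t ≤ s
  · have := bSfx_bounds sh lo p ((sh.length : Int) - p - s).toNat s rfl (by omega)
    omega
  · rw [bSfx, dif_pos (by omega : s < (sh.length : Int) - p),
      if_pos (hm s le_rfl (by omega))]
    exact IH (t - (s + 1)).toNat (by omega) (s + 1) t rfl (by omega) ht
      (fun k hk1 hk2 => hm k (by omega) hk2)

theorem aFill_spec (lo : List String) (j : Int) (hj : 1 ≤ j) :
    ∀ (fuel : Nat) (i : Int) (st : List String),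
      fuel = ((lo.length : Int) - j - i + 1).toNat → 0 ≤ i →
      aFill lo j i st = st ++ (lo.drop i.toNat).take (((lo.length : Int) + 1 - j - i).toNat) := by
  intro fuel
  induction fuel using Nat.strong_induction_on with
  | _ fuel IH =>
  intro i st hf h0
  rw [aFill]
  split_ifs with h1
  · rw [IH ((lo.length : Int) - j - (i + 1) + 1).toNat (by omega) (i + 1) _ rfl (by omega)]
    have hi : i.toNat < lo.length := by omega
    rw [pvGetS_eq lo i h0 hi, List.append_assoc]
    congr 1
    rw [List.drop_eq_getElem_cons hi,
      show ((lo.length : Int) + 1 - j - i).toNat = ((lo.length : Int) - j - i).toNat + 1 by omega,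
      List.take_succ_cons,
      show (i + 1).toNat = i.toNat + 1 by omega]
    simp
    omega
  · rw [show (((lo.length : Int) + 1 - j - i).toNat) = 0 by omega]
    simp

theorem main_lemma (sh lo : List String) (hnm : sh.length ≤ lo.length) :
    ∀ (fuel : Nat) (i j : Int) (st en : List String),
    fuel = ((sh.length : Int) - j - i + 1).toNat →
    0 ≤ i → 1 ≤ j → i + j ≤ (sh.length : Int) + 1 →
    st = sh.take i.toNat → st = lo.take i.toNat →
    en = (sh.drop ((sh.length : Int) + 1 - j).toNat).reverse →
    en = (lo.drop ((lo.length : Int) + 1 - j).toNat).reverse →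
    aFinish sh lo (aLoop sh lo i j st en) =
      decide (bPfx sh lo 0 + bSfx sh lo (bPfx sh lo 0) 0 = (sh.length : Int)) := by
  intro fuel
  induction fuel using Nat.strong_induction_on with
  | _ fuel IH =>
  intro i j st en hf h0i h1j hij hst1 hst2 hen1 hen2
  have hml : (sh.length : Int) ≤ (lo.length : Int) := by exact_mod_cast hnm
  rw [aLoop]
  split_ifs with hg hfm hbm
  · -- front match: advance i
    have hi : i.toNat < sh.length := by omega
    have hi' : i.toNat < lo.length := by omega
    refine IH ((sh.length : Int) - j - (i + 1) + 1).toNat (by omega) (i + 1) j _ _ rfl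
      (by omega) h1j (by omega) ?_ ?_ hen1 hen2
    · rw [hst1, show (i + 1).toNat = i.toNat + 1 by omega, List.take_add_one,
        List.getElem?_eq_getElem hi, pvGetS_eq sh i h0i hi]
      simp
    · rw [hst2, show (i + 1).toNat = i.toNat + 1 by omega, List.take_add_one,
        List.getElem?_eq_getElem hi', hfm, pvGetS_eq lo i h0i hi']
      simp
  · -- back match: advance j
    have hjs : ((sh.length : Int) - j).toNat < sh.length := by omega
    have hjl : ((lo.length : Int) - j).toNat < lo.length := by omega
    refine IH ((sh.length : Int) - (j + 1) - i + 1).toNat (by omega) i (j + 1) _ _ rfl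
      h0i (by omega) (by omega) hst1 hst2 ?_ ?_
    · rw [hen1, show ((sh.length : Int) + 1 - (j + 1)).toNat = ((sh.length : Int) - j).toNat
        by omega, List.drop_eq_getElem_cons hjs, List.reverse_cons,
        show ((sh.length : Int) - j).toNat + 1 = ((sh.length : Int) + 1 - j).toNat by omega,
        pvGetS_eq sh _ (by omega) hjs]
    · rw [hen2, show ((lo.length : Int) + 1 - (j + 1)).toNat = ((lo.length : Int) - j).toNat
        by omega, List.drop_eq_getElem_cons hjl, List.reverse_cons,
        show ((lo.length : Int) - j).toNat + 1 = ((lo.length : Int) + 1 - j).toNat by omega,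
        hbm, pvGetS_eq lo _ (by omega) hjl]
  · -- break: both mismatch; A returns False, and p + s = i + j - 1 < n
    have hp0 := bPfx_bounds sh lo ((sh.length : Int) - 0).toNat 0 rfl le_rfl (by omega)
    have htk : sh.take i.toNat = lo.take i.toNat := hst1.symm.trans hst2
    have hpge : i ≤ bPfx sh lo 0 :=
      bPfx_ge sh lo (i - 0).toNat 0 i rfl le_rfl h0i (by omega)
        (fun k hk0 hk => match_of_take_eq sh lo i htk k hk0 hk)
    have hple : bPfx sh lo 0 ≤ i := by
      by_contra h'
      exact hfm (bPfx_match sh lo ((sh.length : Int) - 0).toNat 0 i rfl le_rfl h0i (by omega))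
    have hdrop : sh.drop ((sh.length : Int) + 1 - j).toNat
        = lo.drop ((lo.length : Int) + 1 - j).toNat :=
      List.reverse_inj.mp (hen1.symm.trans hen2)
    have hbm_all : ∀ k : Int, 0 ≤ k → k < j - 1 →
        pvGetS sh ((sh.length : Int) - 1 - k) = pvGetS lo ((lo.length : Int) - 1 - k) := by
      intro k hk0 hkj
      have ht := drop_eq_get sh lo ((sh.length : Int) + 1 - j).toNat
        ((lo.length : Int) + 1 - j).toNat (j - 2 - k).toNat hdrop
      rw [show ((sh.length : Int) + 1 - j).toNat + (j - 2 - k).toNat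
            = ((sh.length : Int) - 1 - k).toNat by omega,
          show ((lo.length : Int) + 1 - j).toNat + (j - 2 - k).toNat
            = ((lo.length : Int) - 1 - k).toNat by omega] at ht
      rw [pvGetS_nonneg sh _ (by omega), pvGetS_nonneg lo _ (by omega), ht]
    have hsge : j - 1 ≤ bSfx sh lo (bPfx sh lo 0) 0 :=
      bSfx_ge sh lo (bPfx sh lo 0) (j - 1 - 0).toNat 0 (j - 1) rfl (by omega) (by omega)
        (fun k hk0 hk => hbm_all k hk0 hk)
    have hsle : bSfx sh lo (bPfx sh lo 0) 0 ≤ j - 1 := by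
      by_contra h'
      have hm := bSfx_match sh lo (bPfx sh lo 0) ((sh.length : Int) - bPfx sh lo 0 - 0).toNat
        0 (j - 1) rfl (by omega) (by omega)
      rw [show (sh.length : Int) - 1 - (j - 1) = (sh.length : Int) - j by ring,
          show (lo.length : Int) - 1 - (j - 1) = (lo.length : Int) - j by ring] at hm
      exact hbm hm
    have hne : st ++ List.reverse en ≠ sh := by
      intro hEq
      have hlen := congrArg List.length hEq
      rw [hst1] at hlen
      rw [hen1] at hlen
      simp only [List.length_append, List.length_take, List.length_reverse,
        List.length_drop] at hlen
      omega
    simp only [aFinish]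
    rw [if_pos hne]
    exact (decide_eq_false (by omega)).symm
  · -- normal exit: i + j = n + 1; A returns True and p + s = n
    have hijn : i + j = (sh.length : Int) + 1 := by omega
    have htk : sh.take i.toNat = lo.take i.toNat := hst1.symm.trans hst2
    have hp0 := bPfx_bounds sh lo ((sh.length : Int) - 0).toNat 0 rfl le_rfl (by omega)
    have hpge : i ≤ bPfx sh lo 0 :=
      bPfx_ge sh lo (i - 0).toNat 0 i rfl le_rfl h0i (by omega)
        (fun k hk0 hk => match_of_take_eq sh lo i htk k hk0 hk)
    have hdrop : sh.drop ((sh.length : Int) + 1 - j).toNat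
        = lo.drop ((lo.length : Int) + 1 - j).toNat :=
      List.reverse_inj.mp (hen1.symm.trans hen2)
    have hbm_all : ∀ k : Int, 0 ≤ k → k < j - 1 →
        pvGetS sh ((sh.length : Int) - 1 - k) = pvGetS lo ((lo.length : Int) - 1 - k) := by
      intro k hk0 hkj
      have ht := drop_eq_get sh lo ((sh.length : Int) + 1 - j).toNat
        ((lo.length : Int) + 1 - j).toNat (j - 2 - k).toNat hdrop
      rw [show ((sh.length : Int) + 1 - j).toNat + (j - 2 - k).toNat
            = ((sh.length : Int) - 1 - k).toNat by omega,
          show ((lo.length : Int) + 1 - j).toNat + (j - 2 - k).toNat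
            = ((lo.length : Int) - 1 - k).toNat by omega] at ht
      rw [pvGetS_nonneg sh _ (by omega), pvGetS_nonneg lo _ (by omega), ht]
    have hsb := bSfx_bounds sh lo (bPfx sh lo 0)
      ((sh.length : Int) - bPfx sh lo 0 - 0).toNat 0 rfl (by omega)
    have hsge : (sh.length : Int) - bPfx sh lo 0 ≤ bSfx sh lo (bPfx sh lo 0) 0 :=
      bSfx_ge sh lo (bPfx sh lo 0) ((sh.length : Int) - bPfx sh lo 0 - 0).toNat 0
        ((sh.length : Int) - bPfx sh lo 0) rfl (by omega) (by omega)
        (fun k hk0 hk => hbm_all k hk0 (by omega))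
    have hctrl : st ++ List.reverse en = sh := by
      rw [hst1, hen1, List.reverse_reverse,
        show ((sh.length : Int) + 1 - j).toNat = i.toNat by omega, List.take_append_drop]
    have hfill : lo = aFill lo j i st ++ List.reverse en := by
      rw [aFill_spec lo j h1j ((lo.length : Int) - j - i + 1).toNat i st rfl h0i,
        hst2, hen2, List.reverse_reverse, ← List.take_add,
        show i.toNat + (((lo.length : Int) + 1 - j - i).toNat) = ((lo.length : Int) + 1 - j).toNat
          by omega, List.take_append_drop]
    simp only [aFinish]
    rw [if_neg (not_not_intro hctrl), if_pos hfill]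
    exact (decide_eq_true (by omega)).symm

theorem areSentencesSimilar_core (sh lo : List String) (hnm : sh.length ≤ lo.length) :
    aFinish sh lo (aLoop sh lo 0 1 [] []) =
      decide (bPfx sh lo 0 + bSfx sh lo (bPfx sh lo 0) 0 = (sh.length : Int)) := by
  refine main_lemma sh lo hnm ((sh.length : Int) - 1 - 0 + 1).toNat 0 1 [] [] rfl
    (by omega) (by omega) (by omega) ?_ ?_ ?_ ?_ <;> simp

-- ===== VERDICT (by name: the statement is the Claim_ definition above) =====
theorem areSentencesSimilar_spec : Claim_equal_areSentencesSimilar := by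
  intro s1 s2 _
  unfold Spec_areSentencesSimilar areSentencesSimilar areSentencesSimilar_alt
  by_cases h : (PySem.Str.split₀ s1).length > (PySem.Str.split₀ s2).length
  · simp only [if_pos h]
    exact areSentencesSimilar_core _ _ (by omega)
  · simp only [if_neg h]
    exact areSentencesSimilar_core _ _ (by omega)
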